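-- pv_equiv track=rewrite | github.com/krisztiankoos/kubedojo | scripts/module_sections.py | _slot_from_heading
-- ===== SOURCE A (Python) =====
-- _PUNCT_STRIP = " \t:;,.!?-–—"
--
-- _MATCH_PREFIXES = (":", "-", "–", "—")
--
-- _LEARNING_OUTCOMES_ALIASES = (
--     "learning outcomes",
--     "outcomes",
--     "what you'll learn",
--     "what you will learn",
--     "what you'll be able to do",
--     "what you will be able to do",
-- )
--
-- _WHY_MATTERS_ALIASES = (
--     "why this module matters",
--     "why this matters",
-- )
--
-- _DID_YOU_KNOW_ALIASES = (
--     "did you know",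
--     "did you know?",
-- )
--
-- _COMMON_MISTAKES_ALIASES = (
--     "common mistakes",
--     "mistakes to avoid",
-- )
--
-- _QUIZ_ALIASES = (
--     "quiz",
--     "quick quiz",
--     "quiz yourself",
--     "test yourself",
--     "module quiz",
-- )
--
-- _HANDS_ON_ALIASES = (
--     "hands-on exercise",
--     "hands-on",
--     "hands-on lab",
--     "lab",
--     "practice",
-- )
--
-- _NEXT_MODULE_ALIASES = (
--     "next module",
--     "next",
--     "what's next",
--     "what is next",
--     "continue learning",
--     "next steps",
--     "where to go next",
--     "next section",
--     "next modules",
-- )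
--
-- def _normalize_heading_text(heading: str) -> str:
--     return " ".join(heading.strip().lower().split())
--
-- def _strip_alias_suffix(text: str) -> str:
--     return text.rstrip(_PUNCT_STRIP)
--
-- def _matches_alias(heading: str, alias: str) -> bool:
--     if heading == alias:
--         return True
--     if not heading.startswith(alias):
--         return False
--     suffix = heading[len(alias):].lstrip()
--     return suffix.startswith(_MATCH_PREFIXES)
--
-- def _slot_from_heading(heading: str) -> str | None:
--     normalized = _normalize_heading_text(heading)
--     stripped = _strip_alias_suffix(normalized)
--     alias_sets = (
--         (_LEARNING_OUTCOMES_ALIASES, "learning_outcomes"),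
--         (_WHY_MATTERS_ALIASES, "why_matters"),
--         (_DID_YOU_KNOW_ALIASES, "did_you_know"),
--         (_COMMON_MISTAKES_ALIASES, "common_mistakes"),
--         (_QUIZ_ALIASES, "quiz"),
--         (_HANDS_ON_ALIASES, "hands_on"),
--         (_NEXT_MODULE_ALIASES, "next_module"),
--     )
--     for aliases, slot in alias_sets:
--         if any(_matches_alias(stripped, alias) for alias in aliases):
--             return slot
--     return None
-- ===== SOURCE B (Python) =====
-- _PUNCT_STRIP = " \t:;,.!?-\u2013\u2014"
--
-- _MATCH_PREFIXES = (":", "-", "\u2013", "\u2014")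
--
-- _ALIAS_GROUPS = (
--     (("learning outcomes", "outcomes", "what you'll learn", "what you will learn",
--       "what you'll be able to do", "what you will be able to do"), "learning_outcomes"),
--     (("why this module matters", "why this matters"), "why_matters"),
--     (("did you know", "did you know?"), "did_you_know"),
--     (("common mistakes", "mistakes to avoid"), "common_mistakes"),
--     (("quiz", "quick quiz", "quiz yourself", "test yourself", "module quiz"), "quiz"),
--     (("hands-on exercise", "hands-on", "hands-on lab", "lab", "practice"), "hands_on"),
--     (("next module", "next", "what's next", "what is next", "continue learning",
--       "next steps", "where to go next", "next section", "next modules"), "next_module"),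
-- )
--
-- # flat (alias, slot) pairs in original group order, and one exact-lookup dict
-- _PAIRS = tuple((alias, slot) for aliases, slot in _ALIAS_GROUPS for alias in aliases)
-- _EXACT = {alias: slot for alias, slot in _PAIRS}
--
--
-- def _slot_from_heading(heading: str) -> str | None:
--     stripped = " ".join(heading.strip().lower().split()).rstrip(_PUNCT_STRIP)
--     slot = _EXACT.get(stripped)
--     if slot is not None:
--         return slot
--     for alias, slot in _PAIRS:
--         if stripped.startswith(alias) and stripped[len(alias):].lstrip().startswith(_MATCH_PREFIXES):
--             return slot
--     return None
-- ===== Notes on version B (the rewrite author's own statement) =====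
-- stated objective: alternative
-- what changed: A scans the seven alias groups testing each alias with a combined exact-or-fuzzy predicate; B instead does a single exact lookup of the normalized heading in one flat alias-to-slot dict and only on a miss runs one fuzzy prefix scan over the flat (alias, slot) pairs in original group order.
import Mathlib
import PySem

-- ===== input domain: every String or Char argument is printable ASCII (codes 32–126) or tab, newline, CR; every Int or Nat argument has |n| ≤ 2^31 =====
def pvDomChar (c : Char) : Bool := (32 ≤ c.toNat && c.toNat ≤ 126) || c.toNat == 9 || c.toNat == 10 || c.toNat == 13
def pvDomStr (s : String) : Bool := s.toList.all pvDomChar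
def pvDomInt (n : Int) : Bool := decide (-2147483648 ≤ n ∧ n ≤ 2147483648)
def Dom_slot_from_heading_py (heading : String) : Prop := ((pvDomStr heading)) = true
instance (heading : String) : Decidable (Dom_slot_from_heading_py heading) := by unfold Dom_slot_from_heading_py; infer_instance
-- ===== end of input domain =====

-- B replaces A's per-group exact-or-fuzzy predicate scan by an exact lookup in one flat
-- alias→slot dict, with a single fuzzy prefix-scan over the flat (alias, slot) pairs as fallback.

-- ===== PORT A =====
-- exact hand port of str.rstrip(chars) (PySem has no chars-argument rstrip):
-- drop the longest trailing run of characters that are members of `chars`.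
def pyRstripChars (s : String) (chars : List Char) : String :=
  String.ofList ((s.toList.reverse.dropWhile (fun c => chars.contains c)).reverse)

def pyPunctStrip : List Char := " \t:;,.!?-–—".toList

def pyMatchPrefixes : List String := [":", "-", "–", "—"]

def pyAliasSets : List (List String × String) :=
  [ (["learning outcomes", "outcomes", "what you'll learn", "what you will learn",
      "what you'll be able to do", "what you will be able to do"], "learning_outcomes"),
    (["why this module matters", "why this matters"], "why_matters"),
    (["did you know", "did you know?"], "did_you_know"),
    (["common mistakes", "mistakes to avoid"], "common_mistakes"),
    (["quiz", "quick quiz", "quiz yourself", "test yourself", "module quiz"], "quiz"),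
    (["hands-on exercise", "hands-on", "hands-on lab", "lab", "practice"], "hands_on"),
    (["next module", "next", "what's next", "what is next", "continue learning",
      "next steps", "where to go next", "next section", "next modules"], "next_module") ]

def pyNormalizeHeading (heading : String) : String :=
  PySem.Str.join " " (PySem.Str.split₀ (PySem.Str.lower (PySem.Str.strip heading)))

def pyStripAliasSuffix (text : String) : String :=
  pyRstripChars text pyPunctStrip

def pyMatchesAlias (heading alias_ : String) : Bool :=
  if heading == alias_ then true
  else if !(PySem.Str.startswith heading alias_) then false
  else
    pyMatchPrefixes.any (fun p =>
      PySem.Str.startswith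
        (PySem.Str.lstrip (PySem.Str.slice heading (some (PySem.Str.len alias_)) none)) p)

-- the for-loop over alias_sets: first group with a matching alias wins
def pyScanGroups (stripped : String) : Option String :=
  (pyAliasSets.find? (fun g => g.1.any (fun a => pyMatchesAlias stripped a))).map (fun g => g.2)

def slot_from_heading_py (heading : String) : Option String :=
  pyScanGroups (pyStripAliasSuffix (pyNormalizeHeading heading))

-- ===== PORT B =====
def altPunctStrip : List Char := " \t:;,.!?-–—".toList

def altMatchPrefixes : List String := [":", "-", "–", "—"]

-- flat (alias, slot) pairs in original group order
def altPairs : List (String × String) :=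
  [ ("learning outcomes", "learning_outcomes"), ("outcomes", "learning_outcomes"),
    ("what you'll learn", "learning_outcomes"), ("what you will learn", "learning_outcomes"),
    ("what you'll be able to do", "learning_outcomes"), ("what you will be able to do", "learning_outcomes"),
    ("why this module matters", "why_matters"), ("why this matters", "why_matters"),
    ("did you know", "did_you_know"), ("did you know?", "did_you_know"),
    ("common mistakes", "common_mistakes"), ("mistakes to avoid", "common_mistakes"),
    ("quiz", "quiz"), ("quick quiz", "quiz"), ("quiz yourself", "quiz"),
    ("test yourself", "quiz"), ("module quiz", "quiz"),
    ("hands-on exercise", "hands_on"), ("hands-on", "hands_on"), ("hands-on lab", "hands_on"),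
    ("lab", "hands_on"), ("practice", "hands_on"),
    ("next module", "next_module"), ("next", "next_module"), ("what's next", "next_module"),
    ("what is next", "next_module"), ("continue learning", "next_module"),
    ("next steps", "next_module"), ("where to go next", "next_module"),
    ("next section", "next_module"), ("next modules", "next_module") ]

-- the dict comprehension {alias: slot for alias, slot in _PAIRS}
def altExact : PySem.Dict String String :=
  altPairs.foldl (fun d p => d.insert p.1 p.2) (PySem.Dict.mk [])

def altFuzzy (stripped alias_ : String) : Bool :=
  PySem.Str.startswith stripped alias_ &&
    altMatchPrefixes.any (fun p =>
      PySem.Str.startswith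
        (PySem.Str.lstrip (PySem.Str.slice stripped (some (PySem.Str.len alias_)) none)) p)

-- exact dict lookup first, then one fuzzy prefix scan over the flat pairs
def altLookup (stripped : String) : Option String :=
  match altExact.get? stripped with
  | some slot => some slot
  | none => (altPairs.find? (fun p => altFuzzy stripped p.1)).map (fun p => p.2)

def slot_from_heading_py_alt (heading : String) : Option String :=
  altLookup (pyRstripChars
    (PySem.Str.join " " (PySem.Str.split₀ (PySem.Str.lower (PySem.Str.strip heading))))
    altPunctStrip)

-- ===== PRECONDITION & SPEC =====
def Spec_slot_from_heading_py (heading : String) (out : Option String) : Prop := out = slot_from_heading_py_alt heading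
instance (heading : String) (out : Option String) : Decidable (Spec_slot_from_heading_py heading out) := by unfold Spec_slot_from_heading_py; infer_instance

-- ===== CLAIM (what is proved, stated in full; the proofs are below) =====
def Claim_equal_slot_from_heading_py : Prop := ∀ (heading : String), Dom_slot_from_heading_py heading → Spec_slot_from_heading_py heading (slot_from_heading_py heading)

-- ===== LEMMAS AND PROOFS =====

-- on each of the 31 alias strings themselves, A's group scan and B's dict both give that alias's slot
lemma key_eval : ∀ p ∈ altPairs, pyScanGroups p.1 = some p.2 ∧ altExact.get? p.1 = some p.2 := by
  decide

lemma items_altExact : altExact.items = altPairs := by decide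

lemma flatten_pairs : pyAliasSets.flatMap (fun g => g.1.map (fun a => (a, g.2))) = altPairs := by
  decide

-- find? only looks at members
lemma find?_congr_mem {α : Type} (l : List α) (p q : α → Bool)
    (h : ∀ x ∈ l, p x = q x) : l.find? p = l.find? q := by
  induction l with
  | nil => rfl
  | cons a t ih =>
    have ha := h a (by simp)
    simp only [List.find?, ha]
    cases q a with
    | true => rfl
    | false => exact ih (fun x hx => h x (by simp [hx]))

-- first group with a matching alias = first matching pair of the flattened list
lemma scan_flat (f : String → Bool) (gs : List (List String × String)) :
    ((gs.find? (fun g => g.1.any f)).map (fun g => g.2))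
      = (((gs.flatMap (fun g => g.1.map (fun a => (a, g.2)))).find? (fun p => f p.1)).map (fun p => p.2)) := by
  induction gs with
  | nil => rfl
  | cons g gs ih =>
    obtain ⟨as, slot⟩ := g
    have hcomp : List.find? ((fun p => f p.1) ∘ fun a => (a, slot)) as = List.find? f as := rfl
    cases hfa : as.find? f with
    | some a0 =>
      have hany : as.any f = true :=
        List.any_eq_true.mpr ⟨a0, List.mem_of_find?_eq_some hfa, List.find?_some hfa⟩
      rw [List.find?_cons_of_pos (by simpa using hany), List.flatMap_cons, List.find?_append,
        List.find?_map, hcomp, hfa]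
      rfl
    | none =>
      have hany : as.any f = false := by
        rw [List.any_eq_false]
        intro x hx h'
        simp [List.find?_eq_none.mp hfa x hx] at h'
      rw [List.find?_cons_of_neg (by simpa using hany), List.flatMap_cons, List.find?_append,
        List.find?_map, hcomp, hfa]
      simpa using ih

-- off the key set, A's alias test degenerates to B's fuzzy prefix test
lemma matches_eq_fuzzy (s a : String) (h : (s == a) = false) :
    pyMatchesAlias s a = altFuzzy s a := by
  unfold pyMatchesAlias altFuzzy
  cases PySem.Str.startswith s a
  · simp [h]
  · simp [h, pyMatchPrefixes, altMatchPrefixes]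

set_option maxRecDepth 16384 in
lemma core_eq (s : String) : pyScanGroups s = altLookup s := by
  by_cases hm : s ∈ altPairs.map Prod.fst
  · obtain ⟨p, hp, hps⟩ := List.mem_map.mp hm
    subst hps
    obtain ⟨h1, h2⟩ := key_eval p hp
    unfold altLookup
    rw [h2]
    exact h1
  · have hne : ∀ p ∈ altPairs, (p.1 == s) = false := by
      intro p hp
      rw [beq_eq_false_iff_ne]
      intro he
      exact hm (he ▸ List.mem_map_of_mem hp)
    have hget : altExact.get? s = none := by
      unfold PySem.Dict.get?
      rw [items_altExact, List.find?_eq_none.mpr (fun p hp => by simpa using hne p hp)]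
      rfl
    have hfuzzy : altPairs.find? (fun p => pyMatchesAlias s p.1)
        = altPairs.find? (fun p => altFuzzy s p.1) := by
      apply find?_congr_mem
      intro p hp
      exact matches_eq_fuzzy s p.1 (by rw [beq_eq_false_iff_ne]; exact fun he => (beq_eq_false_iff_ne.mp (hne p hp)) he.symm)
    unfold pyScanGroups altLookup
    rw [hget, scan_flat (fun a => pyMatchesAlias s a) pyAliasSets, flatten_pairs]
    simp only [hfuzzy]

-- ===== VERDICT (by name: the statement is the Claim_ definition above) =====
set_option maxRecDepth 16384 in
theorem slot_from_heading_py_spec : Claim_equal_slot_from_heading_py := by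
  intro heading _
  show slot_from_heading_py heading = slot_from_heading_py_alt heading
  have hpunct : altPunctStrip = pyPunctStrip := rfl
  rw [slot_from_heading_py, slot_from_heading_py_alt, hpunct]
  exact core_eq _
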